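-- pv_equiv track=rewrite | github.com/Joeffison/coding_challenges | util/challenges/array_challenges.py | count_max_mushrooms
-- ===== SOURCE A (Python) =====
-- def __prefix_sums(array):
--   n = len(array)
--   sums = [0] * (n + 1)
--   for k in range(1, n + 1):
--     sums[k] = sums[k - 1] + array[k - 1]
--   return sums
--
-- def __count_total(sums, x, y):
--   return sums[y + 1] - sums[x]
--
-- def count_max_mushrooms(array, k, m):
--   """
--     Finds the max sum of elements that can be visited from k, using m moves.
--
--     Problem Name: Mushroom picker
--     The total time complexity of such a solution is O(n + m).
--
--   :param array: n integers (1 <= n <= 100,000)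
--   :param k: Initial Position
--   :param m: Number of Moves
--   :return: Max sum of elements that can be visited from k, using m moves.
--   """
--
--   n = len(array)
--   result = 0
--   pref = __prefix_sums(array)
--
--   # Let's
--   for p in range(min(m, k) + 1):
--     left_pos = k - p
--     right_pos = min(n - 1, max(k, k + m - 2 * p))
--     result = max(result, __count_total(pref, left_pos, right_pos))
--
--   for p in range(min(m + 1, n - k)):
--     right_pos = k + p
--     left_pos = max(0, min(k, k - (m - 2 * p)))
--     result = max(result, __count_total(pref, left_pos, right_pos))
--
--   return result
-- ===== SOURCE B (Python) =====
-- def count_max_mushrooms(array, k, m):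
--   n = len(array)
--   windows = [(k - p, min(n - 1, max(k, k + m - 2 * p))) for p in range(min(m, k) + 1)]
--   windows += [(max(0, min(k, k - (m - 2 * p))), k + p) for p in range(min(m + 1, n - k))]
--   return max([0] + [sum(array[l:r + 1]) for (l, r) in windows])
-- ===== Notes on version B (the rewrite author's own statement) =====
-- stated objective: simpler
-- what changed: B drops A's prefix-sum table and __count_total lookups and the two accumulator loops: it first materialises the list of candidate windows (l, r) from the two move patterns, then returns the max of 0 and the direct slice-sums sum(array[l:r+1]) of those windows.
-- outside the precondition, e.g. on count_max_mushrooms([1, 2, 3], -3, 1): A returns 6, B returns 3; on count_max_mushrooms([5, 7], -2, 1): A returns 12, B returns 5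
import Mathlib
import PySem

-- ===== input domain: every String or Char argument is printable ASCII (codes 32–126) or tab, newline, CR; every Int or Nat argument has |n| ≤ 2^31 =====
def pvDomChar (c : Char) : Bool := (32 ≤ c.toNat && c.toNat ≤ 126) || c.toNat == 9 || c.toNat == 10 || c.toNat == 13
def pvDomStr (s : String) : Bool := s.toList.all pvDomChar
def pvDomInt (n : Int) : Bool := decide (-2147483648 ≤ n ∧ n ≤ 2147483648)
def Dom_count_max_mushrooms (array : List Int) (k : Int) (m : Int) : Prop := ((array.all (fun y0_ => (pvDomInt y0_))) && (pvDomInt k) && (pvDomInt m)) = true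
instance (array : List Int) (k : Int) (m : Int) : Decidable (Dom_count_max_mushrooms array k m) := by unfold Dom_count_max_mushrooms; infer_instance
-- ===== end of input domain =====

-- B drops A's prefix-sum table and accumulator loops: it builds the list of candidate
-- windows and takes the max of 0 and their direct slice-sums (simpler: no helpers/table;
-- not faster).

-- ===== PORT A =====
-- __prefix_sums: sums = [0]*(n+1); for j in range(1, n+1): sums[j] = sums[j-1] + array[j-1]
-- pySetD/pyGetD are the total forms of sums[j]=… / sums[j-1] / array[j-1]; every index in
-- this loop is in range for every input, so they are exact here.
def pvPrefixSums (array : List Int) : List Int :=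
  (PySem.List.pyRange 1 ((array.length : Int) + 1) 1).foldl
    (fun sums j =>
      PySem.List.pySetD sums j
        (PySem.List.pyGetD sums (j - 1) 0 + PySem.List.pyGetD array (j - 1) 0))
    (List.replicate (array.length + 1) 0)

-- __count_total(sums, x, y) = sums[y + 1] - sums[x]; indices out of range (Python IndexError /
-- negative wraparound) only occur outside Pre_count_max_mushrooms.
def pvCountTotal (sums : List Int) (x y : Int) : Int :=
  PySem.List.pyGetD sums (y + 1) 0 - PySem.List.pyGetD sums x 0

def count_max_mushrooms (array : List Int) (k : Int) (m : Int) : Int :=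
  let n : Int := array.length
  let pref := pvPrefixSums array
  let result :=
    (PySem.List.pyRange 0 (min m k + 1) 1).foldl
      (fun result p =>
        let left_pos := k - p
        let right_pos := min (n - 1) (max k (k + m - 2 * p))
        max result (pvCountTotal pref left_pos right_pos)) 0
  (PySem.List.pyRange 0 (min (m + 1) (n - k)) 1).foldl
    (fun result p =>
      let right_pos := k + p
      let left_pos := max 0 (min k (k - (m - 2 * p)))
      max result (pvCountTotal pref left_pos right_pos)) result

-- ===== PORT B =====
-- sum(array[l:r+1])
def pvSliceSum (array : List Int) (x y : Int) : Int :=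
  (PySem.List.slice array (some x) (some (y + 1))).sum

-- windows = [... for p in range(min(m,k)+1)] + [... for p in range(min(m+1,n-k))];
-- max([0] + [sum(array[l:r+1]) for (l,r) in windows]) is the foldl of max from 0.
def count_max_mushrooms_alt (array : List Int) (k : Int) (m : Int) : Int :=
  let n : Int := array.length
  let windows : List (Int × Int) :=
    ((PySem.List.pyRange 0 (min m k + 1) 1).map
        (fun p => (k - p, min (n - 1) (max k (k + m - 2 * p)))))
      ++ ((PySem.List.pyRange 0 (min (m + 1) (n - k)) 1).map
        (fun p => (max 0 (min k (k - (m - 2 * p))), k + p)))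
  (windows.map (fun w => pvSliceSum array w.1 w.2)).foldl max 0

-- ===== PRECONDITION & SPEC =====
-- Pre_ admits every m < 0 (both loops are empty, both programs return 0) and, for m ≥ 0,
-- restricts the start position k to 0 ≤ k ≤ len(array), the function's natural domain.
-- Outside it A either raises IndexError or returns a value produced by Python's
-- negative-index wraparound into the prefix-sum table — a corner no caller would specify,
-- where B's slice-clamping value is equally defensible.
def Pre_count_max_mushrooms (array : List Int) (k : Int) (m : Int) : Prop :=
  (0 ≤ k ∧ k ≤ (array.length : Int)) ∨ m < 0
instance (array : List Int) (k : Int) (m : Int) : Decidable (Pre_count_max_mushrooms array k m) := by unfold Pre_count_max_mushrooms; infer_instance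
def pvWitness_count_max_mushrooms : List Int × Int × Int := ([1, 2, 3], 1, 2)

def Spec_count_max_mushrooms (array : List Int) (k : Int) (m : Int) (out : Int) : Prop := out = count_max_mushrooms_alt array k m
instance (array : List Int) (k : Int) (m : Int) (out : Int) : Decidable (Spec_count_max_mushrooms array k m out) := by unfold Spec_count_max_mushrooms; infer_instance

-- ===== CLAIM (what is proved, stated in full; the proofs are below) =====
def Claim_equal_count_max_mushrooms : Prop := ∀ (array : List Int) (k : Int) (m : Int), Dom_count_max_mushrooms array k m → Pre_count_max_mushrooms array k m → Spec_count_max_mushrooms array k m (count_max_mushrooms array k m)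

-- ===== LEMMAS AND PROOFS =====

-- invariant of the __prefix_sums loop: after the first j iterations, positions 0..j hold the
-- prefix sums and the rest of the table is still 0
lemma pvPrefix_inv (array : List Int) (j : Nat) (hj : j ≤ array.length) :
    (PySem.List.pyRange 1 ((j : Int) + 1) 1).foldl
      (fun sums i =>
        PySem.List.pySetD sums i
          (PySem.List.pyGetD sums (i - 1) 0 + PySem.List.pyGetD array (i - 1) 0))
      (List.replicate (array.length + 1) 0)
    = (List.range (j + 1)).map (fun i => (array.take i).sum)
        ++ List.replicate (array.length - j) 0 := by
  induction j with
  | zero =>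
      rw [PySem.List.pyRange_one_eq_nil (by norm_num)]
      simp [List.replicate_succ]
  | succ j ih =>
      have hj' : j ≤ array.length := by omega
      have hcast : ((j + 1 : Nat) : Int) + 1 = ((j : Int) + 1) + 1 := by push_cast; ring
      rw [hcast, PySem.List.pyRange_one_succ_right (by omega), List.foldl_append,
          ih hj']
      simp only [List.foldl_cons, List.foldl_nil]
      set A := (List.range (j + 1)).map (fun i => (array.take i).sum) with hA
      have hAlen : A.length = j + 1 := by simp [hA]
      have hjn : j < array.length := by omega
      -- the two reads
      have hread1 : PySem.List.pyGetD (A ++ List.replicate (array.length - j) 0) ((j : Int) + 1 - 1) 0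
          = (array.take j).sum := by
        have : ((j : Int) + 1 - 1) = ((j : Nat) : Int) := by ring
        rw [this, PySem.List.pyGetD_natCast]
        rw [List.getD_append _ _ _ _ (by omega)]
        simp [hA]
      have hread2 : PySem.List.pyGetD array ((j : Int) + 1 - 1) 0 = array[j] := by
        have : ((j : Int) + 1 - 1) = ((j : Nat) : Int) := by ring
        rw [this, PySem.List.pyGetD_natCast, List.getD_eq_getElem _ _ hjn]
      rw [hread1, hread2]
      -- the write
      have hwcast : ((j : Int) + 1) = ((j + 1 : Nat) : Int) := by push_cast; ring
      rw [hwcast, PySem.List.pySetD_natCast]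
      -- replicate (n - j) 0 = 0 :: replicate (n - j - 1) 0
      have hrep : List.replicate (array.length - j) (0 : Int)
          = 0 :: List.replicate (array.length - (j + 1)) 0 := by
        have : array.length - j = (array.length - (j + 1)) + 1 := by omega
        rw [this, List.replicate_succ]
      rw [hrep]
      have hset : (A ++ 0 :: List.replicate (array.length - (j + 1)) (0 : Int)).set (j + 1)
            ((array.take j).sum + array[j])
          = (A ++ [(array.take j).sum + array[j]])
              ++ List.replicate (array.length - (j + 1)) 0 := by
        rw [List.set_append_right _ _ (by omega)]
        simp [hAlen]
      rw [hset]
      have hval : (array.take j).sum + array[j] = (array.take (j + 1)).sum := by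
        rw [List.take_add_one, List.getElem?_eq_getElem hjn, List.sum_append,
            Option.toList_some, List.sum_cons, List.sum_nil]
        ring
      rw [hval, hA]
      rw [List.range_succ (n := j + 1)]
      simp

lemma pvPrefixSums_eq (array : List Int) :
    pvPrefixSums array
      = (List.range (array.length + 1)).map (fun i => (array.take i).sum) := by
  unfold pvPrefixSums
  have := pvPrefix_inv array array.length le_rfl
  simpa using this

-- the table lookup equals the slice sum on in-range windows
lemma count_total_eq_slice (array : List Int) (x y : Int)
    (hx : 0 ≤ x) (hxy : x ≤ y + 1) (hy : y + 1 ≤ (array.length : Int)) :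
    pvCountTotal (pvPrefixSums array) x y = pvSliceSum array x y := by
  have hy0 : 0 ≤ y + 1 := le_trans hx hxy
  unfold pvCountTotal pvSliceSum
  rw [pvPrefixSums_eq]
  set f : Nat → Int := fun i => (array.take i).sum with hf
  have hlen : ((List.range (array.length + 1)).map f).length = array.length + 1 := by simp
  have hget : ∀ i : Int, 0 ≤ i → i ≤ (array.length : Int) →
      PySem.List.pyGetD ((List.range (array.length + 1)).map f) i 0 = f i.toNat := by
    intro i h0 hle
    rw [PySem.List.pyGetD_eq_getElem _ _ h0 (by rw [hlen]; omega)]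
    simp [hf]
  rw [hget _ hy0 hy, hget _ hx (by omega)]
  rw [PySem.List.slice_toNat _ hx hy0]
  set a := x.toNat
  set b := (y + 1).toNat
  have hab : a ≤ b := by omega
  have hsplit : array.take b = array.take a ++ (array.drop a).take (b - a) := by
    conv_lhs => rw [show b = a + (b - a) from by omega]
    rw [List.take_add]
  simp only [hf]
  rw [hsplit, List.sum_append]
  ring

-- ===== VERDICT (by name: the statement is the Claim_ definition above) =====
theorem count_max_mushrooms_spec : Claim_equal_count_max_mushrooms := by
  intro array k m _hdom hpre
  unfold Spec_count_max_mushrooms count_max_mushrooms count_max_mushrooms_alt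
  simp only []
  by_cases hk : 0 ≤ k ∧ k ≤ (array.length : Int)
  case neg =>
    have hm : m < 0 := hpre.resolve_left hk
    rw [PySem.List.pyRange_one_eq_nil (a := 0) (b := min m k + 1) (by omega),
        PySem.List.pyRange_one_eq_nil (a := 0) (b := min (m + 1) ((array.length : Int) - k)) (by omega)]
    simp
  case pos =>
  obtain ⟨hk0, hkn⟩ := hk
  have h1 : ∀ (acc p : Int), p ∈ PySem.List.pyRange 0 (min m k + 1) 1 →
      max acc (pvCountTotal (pvPrefixSums array) (k - p)
        (min ((array.length : Int) - 1) (max k (k + m - 2 * p))))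
      = max acc (pvSliceSum array (k - p)
        (min ((array.length : Int) - 1) (max k (k + m - 2 * p)))) := by
    intro acc p hp
    rw [PySem.List.mem_pyRange_one] at hp
    rw [count_total_eq_slice array _ _ (by omega) (by omega) (by omega)]
  have h2 : ∀ (acc p : Int), p ∈ PySem.List.pyRange 0 (min (m + 1) ((array.length : Int) - k)) 1 →
      max acc (pvCountTotal (pvPrefixSums array)
        (max 0 (min k (k - (m - 2 * p)))) (k + p))
      = max acc (pvSliceSum array
        (max 0 (min k (k - (m - 2 * p)))) (k + p)) := by
    intro acc p hp
    rw [PySem.List.mem_pyRange_one] at hp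
    rw [count_total_eq_slice array _ _ (by omega) (by omega) (by omega)]
  rw [PySem.List.foldl_congr_mem _ _ _ _ h1, PySem.List.foldl_congr_mem _ _ _ _ h2]
  simp [List.map_append, List.map_map, List.foldl_append, List.foldl_map, Function.comp]
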